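-- pv_equiv track=rewrite | github.com/emmanuelvende/aoc | 2023/06/p2.py | compute_wins
-- ===== SOURCE A (Python) =====
-- def distance_run(t_waited, t_total):
--     speed = t_waited
--     t_remaining = t_total - t_waited
--     distance = t_remaining * speed
--     return distance
--
-- def compute_wins(race_duration, d_to_beat):
--     wins = 0
--     for t in range(race_duration + 1):
--         t_waiting = race_duration - t
--         d = distance_run(t_waiting, race_duration)
--         if d > d_to_beat:
--             wins += 1
--     return wins
-- ===== SOURCE B (Python) =====
-- def _isqrt(n):
--     # floor square root of n >= 0 by binary search, O(log n)
--     lo, hi = 0, n + 1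
--     while hi - lo > 1:
--         mid = (lo + hi) // 2
--         if mid * mid <= n:
--             lo = mid
--         else:
--             hi = mid
--     return lo
--
-- def compute_wins(race_duration, d_to_beat):
--     # t wins iff t*(race_duration-t) > d_to_beat, i.e. (2t-R)^2 < R^2-4D:
--     # count integers of [0, R] in the open root interval of the quadratic.
--     if race_duration < 0:
--         return 0
--     disc = race_duration * race_duration - 4 * d_to_beat
--     if disc <= 0:
--         return 0
--     s = _isqrt(disc - 1)  # largest m with m*m < disc
--     lo = -((s - race_duration) // 2)  # ceil((R-s)/2)
--     hi = (race_duration + s) // 2     # floor((R+s)/2)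
--     lo = max(lo, 0)
--     hi = min(hi, race_duration)
--     return hi - lo + 1 if hi >= lo else 0
-- ===== Notes on version B (the rewrite author's own statement) =====
-- stated objective: faster
-- what changed: Replaces the O(n) scan of all wait times by solving the quadratic inequality t*(R-t) > D in closed form: an integer square root of the discriminant gives the open root interval, and the answer is the size of its intersection with [0, R].
import Mathlib
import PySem

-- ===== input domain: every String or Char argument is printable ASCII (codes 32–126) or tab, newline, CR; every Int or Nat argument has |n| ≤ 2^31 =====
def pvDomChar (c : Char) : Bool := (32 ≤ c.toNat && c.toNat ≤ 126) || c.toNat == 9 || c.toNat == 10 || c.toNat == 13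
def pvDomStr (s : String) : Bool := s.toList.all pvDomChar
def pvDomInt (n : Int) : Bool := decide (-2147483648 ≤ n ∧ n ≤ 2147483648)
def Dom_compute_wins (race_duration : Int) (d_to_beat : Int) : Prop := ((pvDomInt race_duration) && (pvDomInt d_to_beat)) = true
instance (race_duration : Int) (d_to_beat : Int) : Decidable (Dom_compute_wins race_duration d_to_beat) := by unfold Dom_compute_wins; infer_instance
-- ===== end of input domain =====

-- B replaces A's linear scan by the closed-form count of integers in the open
-- root interval of the quadratic t*(R-t) - D, using a binary-search isqrt (objective: faster).

-- ===== PORT A =====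
def distance_run (t_waited : Int) (t_total : Int) : Int :=
  let speed := t_waited
  let t_remaining := t_total - t_waited
  let distance := t_remaining * speed
  distance

def compute_wins (race_duration : Int) (d_to_beat : Int) : Int :=
  (PySem.List.pyRange 0 (race_duration + 1) 1).foldl
    (fun wins t =>
      let t_waiting := race_duration - t
      let d := distance_run t_waiting race_duration
      if d > d_to_beat then wins + 1 else wins) 0

-- ===== PORT B =====
-- while hi - lo > 1: mid = (lo+hi)//2; if mid*mid <= n: lo = mid else hi = mid
def isqrtLoop (n : Int) (lo : Int) (hi : Int) : Int :=
  if _h : hi - lo > 1 then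
    let mid := PySem.Int.floordiv (lo + hi) 2
    if mid * mid ≤ n then isqrtLoop n mid hi else isqrtLoop n lo mid
  else lo
termination_by (hi - lo).toNat
decreasing_by
  · simp only [PySem.Int.floordiv, Int.fdiv_eq_ediv_of_nonneg _ (by norm_num : (0:Int) ≤ 2)] at *
    omega
  · simp only [PySem.Int.floordiv, Int.fdiv_eq_ediv_of_nonneg _ (by norm_num : (0:Int) ≤ 2)] at *
    omega

def pyIsqrt (n : Int) : Int := isqrtLoop n 0 (n + 1)

def compute_wins_alt (race_duration : Int) (d_to_beat : Int) : Int :=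
  if race_duration < 0 then 0
  else
    let disc := race_duration * race_duration - 4 * d_to_beat
    if disc ≤ 0 then 0
    else
      let s := pyIsqrt (disc - 1)
      let lo := -(PySem.Int.floordiv (s - race_duration) 2)
      let hi := PySem.Int.floordiv (race_duration + s) 2
      let lo' := max lo 0
      let hi' := min hi race_duration
      if hi' ≥ lo' then hi' - lo' + 1 else 0

-- ===== PRECONDITION & SPEC =====
def Spec_compute_wins (race_duration : Int) (d_to_beat : Int) (out : Int) : Prop := out = compute_wins_alt race_duration d_to_beat
instance (race_duration : Int) (d_to_beat : Int) (out : Int) : Decidable (Spec_compute_wins race_duration d_to_beat out) := by unfold Spec_compute_wins; infer_instance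

-- ===== CLAIM (what is proved, stated in full; the proofs are below) =====
def Claim_equal_compute_wins : Prop := ∀ (race_duration : Int) (d_to_beat : Int), Dom_compute_wins race_duration d_to_beat → Spec_compute_wins race_duration d_to_beat (compute_wins race_duration d_to_beat)

-- ===== LEMMAS AND PROOFS =====

-- A's counting loop is countP.
theorem foldl_count (p : Int → Prop) [DecidablePred p] :
    ∀ (l : List Int) (c : Int),
      l.foldl (fun w t => if p t then w + 1 else w) c
        = c + (l.countP (fun t => decide (p t)) : Int) := by
  intro l
  induction l with
  | nil => intro c; simp
  | cons x xs ih =>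
    intro c
    by_cases h : p x <;> simp [List.foldl_cons, h, ih] <;> omega

-- counting an integer interval inside pyRange 0 n 1
theorem countP_interval (a b : Int) :
    ∀ (n : Int), 0 ≤ n →
      ((PySem.List.pyRange 0 n 1).countP (fun t => decide (a ≤ t ∧ t ≤ b)) : Int)
        = max 0 (min b (n - 1) - max a 0 + 1) := by
  intro n hn
  induction n, hn using Int.le_induction with
  | base =>
    rw [PySem.List.pyRange_one_eq_nil le_rfl]
    simp only [List.countP_nil, Nat.cast_zero]
    omega
  | succ n hn ih =>
    rw [PySem.List.pyRange_one_succ_right hn, List.countP_append]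
    push_cast
    rw [ih]
    by_cases h : a ≤ n ∧ n ≤ b <;> simp [h] <;> omega

theorem isqrtLoop_correct (n : Int) :
    ∀ (k : Nat) (lo hi : Int), (hi - lo).toNat ≤ k →
      0 ≤ lo → lo * lo ≤ n → n < hi * hi → lo < hi →
      (isqrtLoop n lo hi) * (isqrtLoop n lo hi) ≤ n ∧
      n < (isqrtLoop n lo hi + 1) * (isqrtLoop n lo hi + 1) := by
  intro k
  induction k with
  | zero => intro lo hi hk h0 hlo hhi hlh; omega
  | succ k ih =>
    intro lo hi hk h0 hlo hhi hlh
    rw [isqrtLoop]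
    by_cases hwh : hi - lo > 1
    · rw [dif_pos hwh]
      have hm : PySem.Int.floordiv (lo + hi) 2 = (lo + hi) / 2 :=
        Int.fdiv_eq_ediv_of_nonneg _ (by norm_num)
      have hmid : lo < PySem.Int.floordiv (lo + hi) 2 ∧ PySem.Int.floordiv (lo + hi) 2 < hi := by
        rw [hm]; omega
      by_cases hle : PySem.Int.floordiv (lo + hi) 2 * PySem.Int.floordiv (lo + hi) 2 ≤ n
      · rw [if_pos hle]
        exact ih _ hi (by omega) (by omega) hle hhi hmid.2
      · rw [if_neg hle]
        exact ih lo _ (by omega) h0 hlo (by omega) hmid.1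
    · rw [dif_neg hwh]
      have : hi = lo + 1 := by omega
      subst this
      exact ⟨hlo, hhi⟩

theorem pyIsqrt_correct (n : Int) (hn : 0 ≤ n) :
    pyIsqrt n * pyIsqrt n ≤ n ∧ n < (pyIsqrt n + 1) * (pyIsqrt n + 1) := by
  unfold pyIsqrt
  exact isqrtLoop_correct n (n + 1 - 0).toNat 0 (n + 1) le_rfl le_rfl (by simpa using hn)
    (by nlinarith) (by omega)

-- ===== VERDICT =====
theorem compute_wins_spec : Claim_equal_compute_wins := by
  intro R D _
  unfold Spec_compute_wins compute_wins compute_wins_alt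
  by_cases hneg : R < 0
  · rw [if_pos hneg, PySem.List.pyRange_one_eq_nil (by omega)]
    simp
  · rw [if_neg hneg]
    rw [not_lt] at hneg
    simp only [distance_run]
    refine Eq.trans (foldl_count (fun t => (R - (R - t)) * (R - t) > D)
      (PySem.List.pyRange 0 (R + 1) 1) 0) ?_
    rw [zero_add]
    by_cases hd : R * R - 4 * D ≤ 0
    · rw [if_pos hd]
      simp only [Nat.cast_eq_zero, List.countP_eq_zero, PySem.List.mem_pyRange_one,
        decide_eq_true_eq, not_lt, gt_iff_lt, and_imp]
      intro t h1 h2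
      nlinarith [sq_nonneg (2 * t - R)]
    · rw [if_neg hd]
      rw [not_le] at hd
      set disc := R * R - 4 * D with hdisc
      obtain ⟨hs1, hs2⟩ := pyIsqrt_correct (disc - 1) (by omega)
      set s := pyIsqrt (disc - 1) with hs
      have hs0 : 0 ≤ s := by nlinarith
      have hfd1 : PySem.Int.floordiv (s - R) 2 = (s - R) / 2 :=
        Int.fdiv_eq_ediv_of_nonneg _ (by norm_num)
      have hfd2 : PySem.Int.floordiv (R + s) 2 = (R + s) / 2 :=
        Int.fdiv_eq_ediv_of_nonneg _ (by norm_num)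
      -- pointwise: t*(R-t) > D ↔ lo ≤ t ≤ hi
      have hpt : ∀ t : Int,
          (decide ((R - (R - t)) * (R - t) > D))
            = decide (-(PySem.Int.floordiv (s - R) 2) ≤ t ∧ t ≤ PySem.Int.floordiv (R + s) 2) := by
        intro t
        apply decide_eq_decide.mpr
        have key : (R - (R - t)) * (R - t) > D ↔ (2 * t - R) * (2 * t - R) < disc := by
          constructor <;> intro h <;> nlinarith
        have key2 : (2 * t - R) * (2 * t - R) < disc ↔ (2 * t - R) * (2 * t - R) ≤ s * s := by
          constructor
          · intro h
            by_contra hc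
            rw [not_le] at hc
            rcases le_or_gt 0 (2 * t - R) with hm | hm
            · have h1 : s < 2 * t - R := by nlinarith
              have h2 : s + 1 ≤ 2 * t - R := by omega
              nlinarith
            · have h1 : s < -(2 * t - R) := by nlinarith
              have h2 : s + 1 ≤ -(2 * t - R) := by omega
              nlinarith
          · intro h; omega
        have key3 : (2 * t - R) * (2 * t - R) ≤ s * s ↔ (-s ≤ 2 * t - R ∧ 2 * t - R ≤ s) := by
          constructor
          · intro h
            constructor <;> nlinarith
          · intro h; nlinarith [h.1, h.2]
        rw [key, key2, key3, hfd1, hfd2]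
        omega
      rw [funext hpt, countP_interval _ _ (R + 1) (by omega)]
      rw [hfd1, hfd2]
      omega
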